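-- pv_equiv track=rewrite | github.com/Costas1992/customer-loyalty-classifier | app/main.py | calculate_rfm
-- ===== SOURCE A (Python) =====
-- def calculate_rfm(visits: list[int]):
--     # Recency: how many months since last visit
--     recency = 12
--     for i in reversed(range(len(visits))):
--         if visits[i] > 0:
--             recency = 12 - i
--             break
--
--     frequency = sum(1 for v in visits if v > 0)  # months with visits
--     monetary  = sum(visits)                        # total visits
--
--     return recency, frequency, monetary
-- ===== SOURCE B (Python) =====
-- def calculate_rfm(visits: list[int]):
--     monetary = 0
--     frequency = 0
--     last_positive = None
--     for i, v in enumerate(visits):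
--         monetary += v
--         if v > 0:
--             frequency += 1
--             last_positive = i
--     recency = 12 if last_positive is None else 12 - last_positive
--     return recency, frequency, monetary
-- ===== Notes on version B (the rewrite author's own statement) =====
-- stated objective: simpler
-- what changed: Replaces A's three separate scans (a reversed early-exit loop for recency, a generator count for frequency, a sum for monetary) with one forward pass maintaining three accumulators and the last positive index.
import Mathlib
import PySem

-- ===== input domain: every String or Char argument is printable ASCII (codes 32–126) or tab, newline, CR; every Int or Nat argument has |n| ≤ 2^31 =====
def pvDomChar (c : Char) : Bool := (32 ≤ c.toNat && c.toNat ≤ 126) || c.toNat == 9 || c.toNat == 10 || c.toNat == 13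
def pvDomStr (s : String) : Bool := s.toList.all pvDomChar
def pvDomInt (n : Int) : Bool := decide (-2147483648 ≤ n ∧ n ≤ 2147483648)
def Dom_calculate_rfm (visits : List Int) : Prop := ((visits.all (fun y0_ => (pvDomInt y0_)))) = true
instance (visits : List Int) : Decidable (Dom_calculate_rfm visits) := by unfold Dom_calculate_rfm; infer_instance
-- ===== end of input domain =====

-- B fuses A's three scans into ONE forward pass with three accumulators (objective: simpler).

-- ===== PORT A =====
-- the `for i in reversed(range(len(visits)))` loop with break: scan the index list,
-- stop at the first positive entry.  Every scanned index is in range, so getD is exact.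
def pvRecLoop (visits : List Int) : List Nat → Int
  | [] => 12
  | i :: rest => if 0 < visits.getD i 0 then 12 - (i : Int) else pvRecLoop visits rest

def calculate_rfm (visits : List Int) : Int × Int × Int :=
  let recency := pvRecLoop visits (List.range visits.length).reverse
  let frequency := visits.foldl (fun acc v => if 0 < v then acc + 1 else acc) (0 : Int)
  let monetary := visits.foldl (· + ·) (0 : Int)
  (recency, frequency, monetary)

-- ===== PORT B =====
-- the single `for i, v in enumerate(visits)` loop of Source B, with its three accumulators.
def pvBLoop (i : Nat) (m f : Int) (lp : Option Nat) : List Int → Int × Int × Option Nat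
  | [] => (m, f, lp)
  | v :: rest =>
      pvBLoop (i + 1) (m + v) (if 0 < v then f + 1 else f) (if 0 < v then some i else lp) rest

def calculate_rfm_alt (visits : List Int) : Int × Int × Int :=
  let st := pvBLoop 0 0 0 none visits
  let recency : Int := match st.2.2 with | none => 12 | some i => 12 - (i : Int)
  (recency, st.2.1, st.1)

-- ===== PRECONDITION & SPEC =====
def Spec_calculate_rfm (visits : List Int) (out : Int × Int × Int) : Prop := out = calculate_rfm_alt visits
instance (visits : List Int) (out : Int × Int × Int) : Decidable (Spec_calculate_rfm visits out) := by unfold Spec_calculate_rfm; infer_instance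

-- ===== CLAIM (what is proved, stated in full; the proofs are below) =====
def Claim_equal_calculate_rfm : Prop := ∀ (visits : List Int), Dom_calculate_rfm visits → Spec_calculate_rfm visits (calculate_rfm visits)

-- ===== LEMMAS AND PROOFS =====

/-- index of the last positive element -/
def lastPos : List Int → Option Nat
  | [] => none
  | v :: rest =>
      match lastPos rest with
      | some j => some (j + 1)
      | none => if 0 < v then some 0 else none

def rec12 : Option Nat → Int
  | none => 12
  | some i => 12 - (i : Int)

def cntPos (l : List Int) : Int := (l.countP (fun v => decide (0 < v)) : Int)

lemma foldl_add_eq (l : List Int) : ∀ a : Int, l.foldl (· + ·) a = a + l.sum := by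
  induction l with
  | nil => simp
  | cons v rest ih => intro a; simp [List.foldl, ih]; ring

lemma foldl_cnt_eq (l : List Int) :
    ∀ a : Int, l.foldl (fun acc v => if 0 < v then acc + 1 else acc) a = a + cntPos l := by
  induction l with
  | nil => simp [cntPos]
  | cons v rest ih =>
      intro a
      simp only [List.foldl, cntPos, List.countP_cons]
      by_cases h : 0 < v <;> simp [h, ih, cntPos] <;> omega

lemma lastPos_none_le {l : List Int} (h : lastPos l = none) : ∀ v ∈ l, v ≤ 0 := by
  induction l with
  | nil => simp
  | cons v rest ih =>
      intro w hw
      simp only [lastPos] at h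
      rcases hj : lastPos rest with _ | j
      · rw [hj] at h
        by_cases hv : 0 < v
        · simp [hv] at h
        · rcases List.mem_cons.mp hw with rfl | hw'
          · omega
          · exact ih hj w hw'
      · rw [hj] at h; simp at h

lemma lastPos_some_lt {l : List Int} {j : Nat} (h : lastPos l = some j) :
    j < l.length ∧ 0 < l.getD j 0 := by
  induction l generalizing j with
  | nil => simp [lastPos] at h
  | cons v rest ih =>
      simp only [lastPos] at h
      rcases hj : lastPos rest with _ | k
      · rw [hj] at h
        by_cases hv : 0 < v
        · simp [hv] at h; subst h; simpa using hv
        · simp [hv] at h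
      · rw [hj] at h
        simp only [Option.some.injEq] at h
        subst h
        have := ih hj
        constructor
        · simpa using this.1
        · simpa using this.2

/-- scanning shifted indices then index 0: the head contributes 12 either way. -/
lemma recLoop_shift (a : Int) (rest : List Int) :
    ∀ l : List Nat,
      pvRecLoop (a :: rest) (l.map Nat.succ ++ [0]) =
        if l.any (fun i => decide (0 < rest.getD i 0)) then pvRecLoop rest l - 1 else 12 := by
  intro l
  induction l with
  | nil =>
      by_cases h : 0 < a <;> simp [pvRecLoop, h]
  | cons i l' ih =>
      simp only [List.map, List.cons_append, pvRecLoop, List.getD_cons_succ, List.any_cons]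
      by_cases h : 0 < rest.getD i 0 <;> rw [List.getD_eq_getElem?_getD] at h
      · simp [h]; omega
      · simp [h, ih]

lemma recLoop_eq_rec12 (l : List Int) :
    pvRecLoop l (List.range l.length).reverse = rec12 (lastPos l) := by
  induction l with
  | nil => simp [pvRecLoop, lastPos, rec12]
  | cons a rest ih =>
      have hrange : (List.range (rest.length + 1)).reverse
          = (List.range rest.length).reverse.map Nat.succ ++ [0] := by
        rw [List.range_succ_eq_map]
        simp [List.reverse_cons, List.map_reverse]
      simp only [List.length_cons, hrange, recLoop_shift]
      rcases hj : lastPos rest with _ | j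
      · have hle := lastPos_none_le hj
        have hany : (List.range rest.length).reverse.any
            (fun i => decide (0 < rest.getD i 0)) = false := by
          simp only [List.any_eq_false, decide_eq_true_eq]
          intro i hi
          rw [List.mem_reverse, List.mem_range] at hi
          rw [List.getD_eq_getElem _ _ hi]
          have := hle _ (List.getElem_mem hi)
          omega
        rw [hany]
        simp only [lastPos, hj, rec12]
        by_cases hv : 0 < a <;> simp [hv, rec12]
      · have hjp := lastPos_some_lt hj
        have hany : (List.range rest.length).reverse.any
            (fun i => decide (0 < rest.getD i 0)) = true := by
          rw [List.any_eq_true]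
          refine ⟨j, by simp [List.mem_range, hjp.1], ?_⟩
          have := hjp.2
          rw [List.getD_eq_getElem?_getD] at this
          simpa using this
        rw [hany, ih, hj]
        simp only [lastPos, hj, rec12]
        push_cast; ring

def olast (k : Nat) (lp : Option Nat) (l : List Int) : Option Nat :=
  match lastPos l with
  | some j => some (k + j)
  | none => lp

lemma bLoop_eq (l : List Int) :
    ∀ (k : Nat) (m f : Int) (lp : Option Nat),
      pvBLoop k m f lp l = (m + l.sum, f + cntPos l, olast k lp l) := by
  induction l with
  | nil => intro k m f lp; simp [pvBLoop, olast, lastPos, cntPos]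
  | cons v rest ih =>
      intro k m f lp
      simp only [pvBLoop, ih]
      refine Prod.ext ?_ (Prod.ext ?_ ?_)
      · simp [List.sum_cons]; ring
      · simp only [cntPos, List.countP_cons]
        by_cases hv : 0 < v <;> simp [hv] <;> omega
      · simp only [olast, lastPos]
        rcases hj : lastPos rest with _ | j
        · by_cases hv : 0 < v <;> simp [hv]
        · simp [Nat.add_assoc, Nat.add_comm 1 j]

-- ===== VERDICT (by name: the statement is the Claim_ definition above) =====
theorem calculate_rfm_spec : Claim_equal_calculate_rfm := by
  intro visits _
  show _ = _
  simp only [calculate_rfm, calculate_rfm_alt, recLoop_eq_rec12, foldl_add_eq, foldl_cnt_eq,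
    bLoop_eq, olast, zero_add]
  rcases hj : lastPos visits with _ | j <;> simp [hj, rec12]
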